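-- pv_equiv track=rewrite | github.com/selimslab/entrophy | services/partial_match.py | compare_tokensets
-- ===== SOURCE A (Python) =====
-- def compare_tokensets(window_tokens: list, needle_tokens: list) -> bool:
--     # diff = []
--     tolerate_single_letter = True
--     for window_token, needle_token in zip(window_tokens, needle_tokens):
--         if window_token == needle_token:
--             continue
--         else:
--             min_token_len = min(len(window_token), len(needle_token))
--             if window_token[:min_token_len] == needle_token[:min_token_len]:
--                 # diff.append((window_token, needle_token))
--                 #  tolerate max 1 single-letter-token diff
--                 # Aranan yerde bir harfli olan kelimeyi doldurma toleransımız sadece 1(bir).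
--                 if len(window_token) == 1:
--                     if not tolerate_single_letter:
--                         return False
--                     tolerate_single_letter = False
--             else:
--                 # tokens are different, so does first parts
--                 return False
--
--     return True
-- ===== SOURCE B (Python) =====
-- def compare_tokensets(window_tokens: list, needle_tokens: list) -> bool:
--     # Divide-and-conquer: the "cost" of a segment of pairs is None on a hard
--     # conflict, else the number of single-letter window fill-ins; costs of two
--     # halves merge by (None-absorbing) addition. Match iff total cost <= 1.
--     pairs = list(zip(window_tokens, needle_tokens))
--
--     def cost(lo, hi):
--         if hi - lo == 0:
--             return 0
--         if hi - lo == 1: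
--             w, n = pairs[lo]
--             if w == n:
--                 return 0
--             if w.startswith(n) or n.startswith(w):
--                 return 1 if len(w) == 1 else 0
--             return None
--         mid = (lo + hi) // 2
--         a = cost(lo, mid)
--         if a is None:
--             return None
--         b = cost(mid, hi)
--         if b is None:
--             return None
--         return a + b
--
--     c = cost(0, len(pairs))
--     return c is not None and c <= 1
-- ===== Notes on version B (the rewrite author's own statement) =====
-- stated objective: alternative
-- what changed: Replaced A's single stateful early-returning loop carrying a tolerate_single_letter flag by a divide-and-conquer over the zipped pairs: each half yields an optional mismatch cost (None on a hard conflict, startswith-based prefix test, 1 per single-letter window mismatch), halves merge by None-absorbing addition, and the total cost is compared with 1.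
import Mathlib
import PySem

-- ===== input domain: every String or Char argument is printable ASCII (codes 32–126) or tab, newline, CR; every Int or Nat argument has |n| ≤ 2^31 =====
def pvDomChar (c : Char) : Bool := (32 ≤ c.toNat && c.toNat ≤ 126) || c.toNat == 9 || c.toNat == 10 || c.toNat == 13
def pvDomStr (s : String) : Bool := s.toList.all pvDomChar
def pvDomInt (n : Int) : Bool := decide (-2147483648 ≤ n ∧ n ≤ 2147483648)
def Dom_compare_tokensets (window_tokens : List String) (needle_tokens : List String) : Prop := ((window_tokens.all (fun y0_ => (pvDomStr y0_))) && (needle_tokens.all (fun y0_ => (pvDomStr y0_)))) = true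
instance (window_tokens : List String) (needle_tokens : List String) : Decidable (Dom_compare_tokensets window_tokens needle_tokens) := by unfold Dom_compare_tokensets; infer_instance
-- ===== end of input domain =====

-- B replaces A's stateful early-returning loop (tolerate_single_letter flag) by a
-- divide-and-conquer over the zipped pairs merging optional mismatch costs
-- (None-absorbing addition), then compares the total cost with 1 (objective: alternative).


-- ===== PORT A =====
-- the loop over zip(window_tokens, needle_tokens) with the tolerate_single_letter flag;
-- w[:m] with m = min(len w, len n) ≥ 0 is exactly List.take m on the characters
def compare_tokensets_loop : List (String × String) → Bool → Bool
  | [], _ => true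
  | (w, n) :: rest, tol =>
    if w = n then compare_tokensets_loop rest tol
    else
      let m := min w.toList.length n.toList.length
      if w.toList.take m = n.toList.take m then
        if w.toList.length = 1 then
          if !tol then false
          else compare_tokensets_loop rest false
        else compare_tokensets_loop rest tol
      else false

def compare_tokensets (window_tokens : List String) (needle_tokens : List String) : Bool :=
  compare_tokensets_loop (window_tokens.zip needle_tokens) true

-- ===== PORT B =====
-- divide-and-conquer over pairs[lo:hi]; pairs[lo] (always in range when reached) is getD;
-- Python's None-or-count return type is Option Nat
def compare_tokensets_cost (pairs : List (String × String)) (lo hi : Nat) : Option Nat :=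
  if hi - lo = 0 then some 0
  else if hi - lo = 1 then
    let p := pairs.getD lo ("", "")
    if p.1 == p.2 then some 0
    else if PySem.Str.startswith p.1 p.2 || PySem.Str.startswith p.2 p.1 then
      some (if p.1.toList.length = 1 then 1 else 0)
    else none
  else
    -- mid = (lo + hi) // 2, inlined at its uses
    match compare_tokensets_cost pairs lo ((lo + hi) / 2) with
    | none => none
    | some a =>
      match compare_tokensets_cost pairs ((lo + hi) / 2) hi with
      | none => none
      | some b => some (a + b)
termination_by hi - lo
decreasing_by all_goals omega

-- pairs = list(zip(...)), inlined at its two uses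
def compare_tokensets_alt (window_tokens : List String) (needle_tokens : List String) : Bool :=
  match compare_tokensets_cost (window_tokens.zip needle_tokens) 0
      (window_tokens.zip needle_tokens).length with
  | none => false
  | some c => decide (c ≤ 1)

-- ===== PRECONDITION & SPEC =====
def Spec_compare_tokensets (window_tokens : List String) (needle_tokens : List String) (out : Bool) : Prop := out = compare_tokensets_alt window_tokens needle_tokens
instance (window_tokens : List String) (needle_tokens : List String) (out : Bool) : Decidable (Spec_compare_tokensets window_tokens needle_tokens out) := by unfold Spec_compare_tokensets; infer_instance

-- ===== CLAIM (what is proved, stated in full; the proofs are below) =====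
def Claim_equal_compare_tokensets : Prop := ∀ (window_tokens : List String) (needle_tokens : List String), Dom_compare_tokensets window_tokens needle_tokens → Spec_compare_tokensets window_tokens needle_tokens (compare_tokensets window_tokens needle_tokens)

-- ===== LEMMAS AND PROOFS =====

-- proof-side linear specification: the optional cost of one pair, and of a pair list
def pairCost (p : String × String) : Option Nat :=
  if p.1 == p.2 then some 0
  else if PySem.Str.startswith p.1 p.2 || PySem.Str.startswith p.2 p.1 then
    some (if p.1.toList.length = 1 then 1 else 0)
  else none

def segMism : List (String × String) → Option Nat
  | [] => some 0
  | p :: rest =>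
    match pairCost p, segMism rest with
    | some a, some b => some (a + b)
    | _, _ => none

theorem segMism_append (xs ys : List (String × String)) :
    segMism (xs ++ ys) =
      match segMism xs, segMism ys with
      | some a, some b => some (a + b)
      | _, _ => none := by
  induction xs with
  | nil => cases h : segMism ys <;> simp [segMism, h]
  | cons p tl ih =>
    simp only [List.cons_append, segMism, ih]
    cases pairCost p <;> cases segMism tl <;> cases segMism ys <;> simp [Nat.add_assoc]

-- the divide-and-conquer computes the linear cost of the segment pairs[lo:hi]
theorem cost_eq_segMism (pairs : List (String × String)) (lo hi : Nat)
    (hlo : lo ≤ hi) (hhi : hi ≤ pairs.length) :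
    compare_tokensets_cost pairs lo hi = segMism ((pairs.drop lo).take (hi - lo)) := by
  by_cases h0 : hi - lo = 0
  · rw [compare_tokensets_cost, if_pos h0, h0]
    simp [segMism]
  · by_cases h1 : hi - lo = 1
    · rw [compare_tokensets_cost, if_neg h0, if_pos h1, h1]
      have hlt : lo < pairs.length := by omega
      have hdrop : (pairs.drop lo).take 1 = [pairs[lo]] := by
        have : pairs.drop lo = pairs[lo] :: pairs.drop (lo + 1) := by
          rw [List.drop_eq_getElem_cons hlt]
        rw [this, List.take_succ_cons, List.take_zero]
      rw [hdrop]
      have hget : pairs.getD lo ("", "") = pairs[lo] := by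
        simp [List.getD, hlt]
      simp only [hget, segMism, pairCost]
      split
      · simp
      · split
        · simp
        · simp
    · rw [compare_tokensets_cost, if_neg h0, if_neg h1]
      have hmid1 : lo ≤ (lo + hi) / 2 := by omega
      have hmid2 : (lo + hi) / 2 ≤ hi := by omega
      rw [cost_eq_segMism pairs lo ((lo + hi) / 2) hmid1 (le_trans hmid2 hhi),
          cost_eq_segMism pairs ((lo + hi) / 2) hi hmid2 hhi]
      have hsplit : (pairs.drop lo).take (hi - lo) =
          (pairs.drop lo).take ((lo + hi) / 2 - lo) ++
          (pairs.drop ((lo + hi) / 2)).take (hi - (lo + hi) / 2) := by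
        have h2 : hi - lo = ((lo + hi) / 2 - lo) + (hi - (lo + hi) / 2) := by omega
        have h3 : lo + ((lo + hi) / 2 - lo) = (lo + hi) / 2 := by omega
        rw [h2, List.take_add, List.drop_drop, h3]
      rw [hsplit, segMism_append]
      cases segMism ((pairs.drop lo).take ((lo + hi) / 2 - lo)) <;>
        cases segMism ((pairs.drop ((lo + hi) / 2)).take (hi - (lo + hi) / 2)) <;> rfl
termination_by hi - lo
decreasing_by all_goals omega

-- the take-min prefix test of A is the startswith-or test of B
theorem prefix_compat_iff (a b : List Char) :
    a.take (min a.length b.length) = b.take (min a.length b.length) ↔ (a <+: b ∨ b <+: a) := by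
  rcases le_total a.length b.length with h | h
  · rw [Nat.min_eq_left h, List.take_length]
    constructor
    · intro heq
      exact Or.inl (by rw [heq]; exact List.take_prefix _ _)
    · rintro (hp | hp)
      · exact List.prefix_iff_eq_take.mp hp
      · rw [hp.eq_of_length_le h, List.take_length]
  · rw [Nat.min_eq_right h, List.take_length]
    constructor
    · intro heq
      exact Or.inr (by rw [← heq]; exact List.take_prefix _ _)
    · rintro (hp | hp)
      · rw [hp.eq_of_length_le h, List.take_length]
      · exact (List.prefix_iff_eq_take.mp hp).symm

-- characterisation of A's loop by the linear cost and the remaining tolerance budget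
theorem loop_eq_segMism (l : List (String × String)) (tol : Bool) :
    compare_tokensets_loop l tol =
      (match segMism l with
       | none => false
       | some c => decide (c ≤ if tol then 1 else 0)) := by
  induction l generalizing tol with
  | nil => cases tol <;> simp [compare_tokensets_loop, segMism]
  | cons hd tl ih =>
    obtain ⟨w, n⟩ := hd
    by_cases hwn : w = n
    · subst hwn
      simp only [compare_tokensets_loop, segMism, pairCost, BEq.rfl, if_pos]
      rw [ih]
      cases segMism tl <;> simp
    · have hbeq : (w == n) = false := by simpa using hwn
      simp only [compare_tokensets_loop, if_neg hwn, segMism, pairCost, hbeq,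
        Bool.false_eq_true, if_false]
      by_cases hcompat :
          w.toList.take (min w.toList.length n.toList.length)
            = n.toList.take (min w.toList.length n.toList.length)
      · have hsw : (PySem.Str.startswith w n || PySem.Str.startswith n w) = true := by
          rw [prefix_compat_iff] at hcompat
          simp only [Bool.or_eq_true, PySem.Str.startswith_eq, PySem.Chars.startswith_iff]
          tauto
        rw [if_pos hcompat, hsw, if_pos rfl]
        by_cases hlen : w.toList.length = 1
        · rw [if_pos hlen, if_pos hlen]
          cases tol with
          | false =>
            simp only [Bool.not_false]
            cases segMism tl <;> simp
          | true =>
            simp only [Bool.not_true, Bool.false_eq_true, if_false]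
            rw [ih]
            cases segMism tl <;> simp
        · rw [if_neg hlen, if_neg hlen, ih]
          cases segMism tl <;> simp
      · have hsw : (PySem.Str.startswith w n || PySem.Str.startswith n w) = false := by
          rw [Bool.eq_false_iff]
          intro hc
          apply hcompat
          rw [prefix_compat_iff]
          simp only [Bool.or_eq_true, PySem.Str.startswith_eq, PySem.Chars.startswith_iff] at hc
          tauto
        rw [if_neg hcompat, hsw]
        simp

-- ===== VERDICT (by name: the statement is the Claim_ definition above) =====
theorem compare_tokensets_spec : Claim_equal_compare_tokensets := by
  intro ws ns _
  unfold Spec_compare_tokensets compare_tokensets compare_tokensets_alt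
  rw [loop_eq_segMism,
      cost_eq_segMism (ws.zip ns) 0 (ws.zip ns).length (Nat.zero_le _) le_rfl]
  simp only [List.drop_zero, Nat.sub_zero, List.take_length]
  cases segMism (ws.zip ns) <;> simp
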